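-- pv_equiv track=rewrite | github.com/shisa-ai/shisad | src/shisad/daemon/handlers/_impl_session.py | _normalize_source_taint_labels
-- ===== SOURCE A (Python) =====
-- from typing import Any, Literal
--
-- def _normalize_source_taint_labels(raw: Any) -> list[str]:
--     if not isinstance(raw, list):
--         return []
--     labels: list[str] = []
--     for item in raw:
--         value = str(item).strip().lower()
--         if value:
--             labels.append(value)
--     return sorted(set(labels))
-- ===== SOURCE B (Python) =====
-- def _normalize_source_taint_labels(raw):
--     if not isinstance(raw, list):
--         return []
--     cleaned = sorted(str(item).strip().lower() for item in raw)
--     out = []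
--     for value in cleaned:
--         if value and (not out or out[-1] != value):
--             out.append(value)
--     return out
-- ===== Notes on version B (the rewrite author's own statement) =====
-- stated objective: idiomatic
-- what changed: B drops the hash-set dedup: it sorts all normalized values first and then removes duplicates in one pass by skipping values equal to the last one kept (sort-then-collapse-adjacent instead of set-then-sort).
import Mathlib
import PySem

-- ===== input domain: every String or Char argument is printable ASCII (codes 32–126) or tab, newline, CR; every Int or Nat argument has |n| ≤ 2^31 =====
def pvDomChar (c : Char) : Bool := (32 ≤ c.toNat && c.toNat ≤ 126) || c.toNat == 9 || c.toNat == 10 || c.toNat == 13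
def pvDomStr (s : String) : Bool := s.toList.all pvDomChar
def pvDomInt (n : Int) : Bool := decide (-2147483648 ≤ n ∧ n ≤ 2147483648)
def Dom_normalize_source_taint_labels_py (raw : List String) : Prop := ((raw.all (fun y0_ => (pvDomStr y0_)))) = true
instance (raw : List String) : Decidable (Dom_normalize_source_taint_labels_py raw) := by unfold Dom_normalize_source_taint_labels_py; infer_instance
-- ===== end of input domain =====

-- B replaces A's hash-set dedup by sort-first-then-collapse-adjacent-duplicates (idiomatic alternative; same result).

-- ===== PORT A =====
-- A: build the normalized non-empty labels in order, then sorted(set(labels)).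
def normalize_source_taint_labels_py (raw : List String) : List String :=
  let labels : List String := raw.foldl (fun acc item =>
    let value := PySem.Str.lower (PySem.Str.strip item)
    if value ≠ "" then acc ++ [value] else acc) []
  PySem.List.sorted (PySem.Set.ofList labels) (fun x => x) false

-- ===== PORT B =====
-- B: sort all normalized values (empties included), then one pass appending a value
-- only if it is non-empty and differs from the last appended one.
def nstlAltStep (out : List String) (value : String) : List String :=
  if value ≠ "" ∧ (out = [] ∨ PySem.List.pyGet? out (-1) ≠ some value) then out ++ [value] else out

def normalize_source_taint_labels_py_alt (raw : List String) : List String :=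
  let cleaned := PySem.List.sorted (raw.map (fun item => PySem.Str.lower (PySem.Str.strip item))) (fun x => x) false
  cleaned.foldl nstlAltStep []

-- ===== PRECONDITION & SPEC =====
def Spec_normalize_source_taint_labels_py (raw : List String) (out : List String) : Prop := out = normalize_source_taint_labels_py_alt raw
instance (raw : List String) (out : List String) : Decidable (Spec_normalize_source_taint_labels_py raw out) := by unfold Spec_normalize_source_taint_labels_py; infer_instance

-- ===== CLAIM (what is proved, stated in full; the proofs are below) =====
def Claim_equal_normalize_source_taint_labels_py : Prop := ∀ (raw : List String), Dom_normalize_source_taint_labels_py raw → Spec_normalize_source_taint_labels_py raw (normalize_source_taint_labels_py raw)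

-- ===== LEMMAS AND PROOFS =====

-- A's accumulation loop is filtering the mapped list
theorem nstl_labels_eq (g : String → String) (raw : List String) (acc : List String) :
    raw.foldl (fun acc item =>
      let value := g item
      if value ≠ "" then acc ++ [value] else acc) acc
    = acc ++ (raw.map g).filter (fun v => v ≠ "") := by
  induction raw generalizing acc with
  | nil => simp
  | cons x xs ih =>
    rw [List.foldl_cons]
    by_cases h : g x = ""
    · simp only [h]; rw [ih]; simp [h]
    · simp only [if_pos (by exact h)]
      rw [ih]; simp [h]

-- every element of a strictly increasing list is ≤ its last element
theorem nstl_le_getLast {l : List String} (hp : l.Pairwise (· < ·)) :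
    ∀ a ∈ l, ∀ b, l.getLast? = some b → a ≤ b := by
  induction l with
  | nil => simp
  | cons x xs ih =>
    intro a ha b hb
    cases xs with
    | nil =>
      simp at ha hb; simp [ha, hb]
    | cons y ys =>
      rw [List.getLast?_cons_cons] at hb
      have hp' := List.pairwise_cons.mp hp
      rcases List.mem_cons.mp ha with h | h
      · subst h
        have hy : y ≤ b := ih hp'.2 y List.mem_cons_self b hb
        exact le_trans (le_of_lt (hp'.1 y List.mem_cons_self)) hy
      · exact ih hp'.2 a h b hb

-- core invariant of B's collapsing pass
theorem nstl_collapse_spec (rest : List String) :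
    ∀ acc : List String, rest.Pairwise (· ≤ ·) → acc.Pairwise (· < ·) →
    (∀ v ∈ rest, ∀ a ∈ acc, a ≤ v) →
    (rest.foldl nstlAltStep acc).Pairwise (· < ·) ∧
    (∀ x, x ∈ rest.foldl nstlAltStep acc ↔ x ∈ acc ∨ (x ∈ rest ∧ x ≠ "")) := by
  induction rest with
  | nil => intro acc _ hacc _; simpa using hacc
  | cons v rest ih =>
    intro acc hrest hacc hle
    have hrest' := List.pairwise_cons.mp hrest
    rw [List.foldl_cons]
    by_cases hcond : v ≠ "" ∧ (acc = [] ∨ PySem.List.pyGet? acc (-1) ≠ some v)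
    · -- B appends v
      have hstep : nstlAltStep acc v = acc ++ [v] := by simp only [nstlAltStep, if_pos hcond]
      rw [hstep]
      have hlt : ∀ a ∈ acc, a < v := by
        intro a ha
        rcases hcond.2 with hnil | hlast
        · subst hnil; simp at ha
        · have hne : acc ≠ [] := by intro h; subst h; simp at ha
          have hb : acc.getLast? = some (acc.getLast hne) := List.getLast?_eq_some_getLast hne
          have hbv : acc.getLast hne ≠ v := by
            intro h
            exact hlast (by rw [PySem.List.pyGet?_neg_one, hb, h])
          have h1 : a ≤ acc.getLast hne := nstl_le_getLast hacc a ha _ hb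
          have h2 : acc.getLast hne ≤ v :=
            hle v List.mem_cons_self _ (List.getLast_mem hne)
          exact lt_of_le_of_lt h1 (lt_of_le_of_ne h2 hbv)
      have hacc' : (acc ++ [v]).Pairwise (· < ·) := by
        rw [List.pairwise_append]
        exact ⟨hacc, List.pairwise_singleton _ _, by intro a ha x hx; simp at hx; subst hx; exact hlt a ha⟩
      have hle' : ∀ w ∈ rest, ∀ a ∈ acc ++ [v], a ≤ w := by
        intro w hw a ha
        rcases List.mem_append.mp ha with h | h
        · exact hle w (List.mem_cons_of_mem _ hw) a h
        · simp at h; subst h; exact hrest'.1 w hw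
      obtain ⟨hp, hm⟩ := ih (acc ++ [v]) hrest'.2 hacc' hle'
      refine ⟨hp, fun x => ?_⟩
      rw [hm x]
      simp only [List.mem_append, List.mem_cons, List.not_mem_nil, or_false]
      constructor
      · rintro ((h | h) | ⟨h, hne⟩)
        · exact Or.inl h
        · exact Or.inr ⟨Or.inl h, h ▸ hcond.1⟩
        · exact Or.inr ⟨Or.inr h, hne⟩
      · rintro (h | ⟨h | h, hne⟩)
        · exact Or.inl (Or.inl h)
        · exact Or.inl (Or.inr h)
        · exact Or.inr ⟨h, hne⟩
    · -- B skips v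
      have hstep : nstlAltStep acc v = acc := by simp only [nstlAltStep, if_neg hcond]
      rw [hstep]
      have hvc : v = "" ∨ v ∈ acc := by
        by_cases hv : v = ""
        · exact Or.inl hv
        · right
          push Not at hcond
          obtain ⟨hne, hlast⟩ := hcond hv
          exact PySem.List.mem_of_pyGet?_eq_some (xs := acc) (i := -1) hlast
      have hle' : ∀ w ∈ rest, ∀ a ∈ acc, a ≤ w :=
        fun w hw a ha => hle w (List.mem_cons_of_mem _ hw) a ha
      obtain ⟨hp, hm⟩ := ih acc hrest'.2 hacc hle'
      refine ⟨hp, fun x => ?_⟩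
      rw [hm x]
      simp only [List.mem_cons]
      constructor
      · rintro (h | ⟨h, hne⟩)
        · exact Or.inl h
        · exact Or.inr ⟨Or.inr h, hne⟩
      · rintro (h | ⟨h | h, hne⟩)
        · exact Or.inl h
        · subst h
          rcases hvc with h | h
          · exact absurd h hne
          · exact Or.inl h
        · exact Or.inr ⟨h, hne⟩

-- ===== VERDICT (by name: the statement is the Claim_ definition above) =====
theorem normalize_source_taint_labels_py_spec : Claim_equal_normalize_source_taint_labels_py := by
  intro raw _
  unfold Spec_normalize_source_taint_labels_py normalize_source_taint_labels_py normalize_source_taint_labels_py_alt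
  set f : String → String := fun item => PySem.Str.lower (PySem.Str.strip item) with hf
  set labels : List String := ((raw.map f).filter (fun v => v ≠ "")) with hlabels
  have hA : (raw.foldl (fun acc item =>
      let value := f item
      if value ≠ "" then acc ++ [value] else acc) []) = labels := by
    rw [nstl_labels_eq]; simp [hlabels]
  rw [hA]
  have hsorted := PySem.List.sorted_pairwise (raw.map f) (fun x => x) (κ := String)
  obtain ⟨hp, hm⟩ := nstl_collapse_spec (PySem.List.sorted (raw.map f) (fun x => x) false) []
    hsorted (List.Pairwise.nil) (by simp)
  have hnodupB : (List.foldl nstlAltStep [] (PySem.List.sorted (raw.map f) (fun x => x) false)).Nodup :=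
    hp.nodup
  have hperm : (List.foldl nstlAltStep [] (PySem.List.sorted (raw.map f) (fun x => x) false)).Perm
      (PySem.Set.ofList labels) := by
    rw [List.perm_ext_iff_of_nodup hnodupB (PySem.Set.nodup_ofList _)]
    intro a
    rw [hm a, PySem.Set.mem_ofList, hlabels]
    simp only [List.not_mem_nil, false_or, List.mem_filter,
      PySem.List.mem_sorted, decide_not, Bool.not_eq_eq_eq_not, Bool.not_true, decide_eq_false_iff_not]
  exact PySem.List.sorted_eq_of_perm_of_pairwise_lt _ _ _ hperm hp
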